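-- pv_equiv track=rewrite | github.com/christy-yuan-li/Entity-Extraction | Parse.py | get_parsed_text
-- ===== SOURCE A (Python) =====
-- def get_parsed_text(lines):
--     parse_sentences = []
--     sentence_lines = []
--     for line in lines:
--         if not line.strip(): continue
--         if 'sentence #' in line.lower():
--             if sentence_lines:
--                 parse_sentences.append(' '.join(sentence_lines))
--             sentence_lines = []
--         elif line.strip()[0] == '(':
--             sentence_lines.append(line.strip())
--     if sentence_lines:
--         parse_sentences.append(' '.join(sentence_lines))
--     return parse_sentences
-- ===== SOURCE B (Python) =====
-- def get_parsed_text(lines):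
--     # Group the stripped paren-lines into a dict keyed by the number of
--     # 'sentence #' marker lines seen so far, then emit the groups by sorted key.
--     # Empty groups simply never get a dict entry, so they are skipped for free.
--     groups = {}
--     gid = 0
--     for line in lines:
--         s = line.strip()
--         if not s:
--             continue
--         if 'sentence #' in line.lower():
--             gid += 1
--         elif s[0] == '(':
--             groups[gid] = groups.get(gid, []) + [s]
--     return [' '.join(groups[g]) for g in sorted(groups)]
-- ===== Notes on version B (the rewrite author's own statement) =====
-- stated objective: alternative
-- what changed: Replaces A's accumulate-and-flush loop (running sentence buffer flushed at each marker and once more after the loop) with a dict that groups paren-lines under a running marker-count key, followed by a sorted-keys join pass; no flush logic or trailing flush exists in B, empty segments are skipped because they never get a dict entry.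
import Mathlib
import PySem

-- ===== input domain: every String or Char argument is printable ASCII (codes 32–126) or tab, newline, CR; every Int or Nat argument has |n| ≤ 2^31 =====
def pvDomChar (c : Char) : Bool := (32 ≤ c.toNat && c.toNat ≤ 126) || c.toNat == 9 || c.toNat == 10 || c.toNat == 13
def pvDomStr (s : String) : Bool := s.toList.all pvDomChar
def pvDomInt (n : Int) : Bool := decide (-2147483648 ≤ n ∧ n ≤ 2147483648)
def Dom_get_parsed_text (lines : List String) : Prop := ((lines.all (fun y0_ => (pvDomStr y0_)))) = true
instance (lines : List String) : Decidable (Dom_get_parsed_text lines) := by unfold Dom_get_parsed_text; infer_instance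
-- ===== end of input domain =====

-- B replaces A's accumulate-and-flush loop by a dict grouping paren-lines under a
-- running marker-count key, emitted by sorted keys (objective: alternative structure).

-- ===== PORT A =====
-- one loop step of A: skip blanks, flush the buffer on a marker line, accumulate stripped '('-lines
def aStep (st : List String × List String) (line : String) : List String × List String :=
  if PySem.Str.strip line = "" then st
  else if PySem.Str.isIn "sentence #" (PySem.Str.lower line) then
    (if st.2 ≠ [] then st.1 ++ [PySem.Str.join " " st.2] else st.1, [])
  else if PySem.Str.pyGet? (PySem.Str.strip line) 0 = some '(' then
    (st.1, st.2 ++ [PySem.Str.strip line])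
  else st

-- the final 'if sentence_lines: parse_sentences.append(...)'
def flushA (st : List String × List String) : List String :=
  if st.2 ≠ [] then st.1 ++ [PySem.Str.join " " st.2] else st.1

def get_parsed_text (lines : List String) : List String :=
  flushA (lines.foldl aStep ([], []))

-- ===== PORT B =====
-- one loop step of B: skip blanks, bump the group id on a marker line,
-- append stripped '('-lines under key gid ('groups[gid] = groups.get(gid, []) + [s]')
def bStep (st : PySem.Dict Int (List String) × Int) (line : String) :
    PySem.Dict Int (List String) × Int :=
  if PySem.Str.strip line = "" then st
  else if PySem.Str.isIn "sentence #" (PySem.Str.lower line) then (st.1, st.2 + 1)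
  else if PySem.Str.pyGet? (PySem.Str.strip line) 0 = some '(' then
    (st.1.insert st.2 (st.1.getD st.2 [] ++ [PySem.Str.strip line]), st.2)
  else st

def get_parsed_text_alt (lines : List String) : List String :=
  let d := (lines.foldl bStep (PySem.Dict.empty, 0)).1
  (PySem.List.sorted d.keys (fun k => k) false).map (fun g => PySem.Str.join " " (d.getD g []))

-- ===== PRECONDITION & SPEC =====
def Spec_get_parsed_text (lines : List String) (out : List String) : Prop := out = get_parsed_text_alt lines
instance (lines : List String) (out : List String) : Decidable (Spec_get_parsed_text lines out) := by unfold Spec_get_parsed_text; infer_instance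

-- ===== CLAIM (what is proved, stated in full; the proofs are below) =====
def Claim_equal_get_parsed_text : Prop := ∀ (lines : List String), Dom_get_parsed_text lines → Spec_get_parsed_text lines (get_parsed_text lines)

-- ===== LEMMAS AND PROOFS =====

-- the coupling invariant between A's (parse_sentences, sentence_lines) and B's (groups, gid):
-- the dict's items are the already-flushed sentences' line lists under keys < gid,
-- followed by the current buffer (iff nonempty) under key gid
def Shape (ps sl : List String) (d : PySem.Dict Int (List String)) (g : Int) : Prop :=
  ∃ D : List (Int × List String),
    d.items = D ++ (if sl = [] then [] else [(g, sl)]) ∧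
    ps = D.map (fun e => PySem.Str.join " " e.2) ∧
    (∀ k ∈ D.map Prod.fst, k < g) ∧
    (D.map Prod.fst).Pairwise (· < ·)

lemma shape_keys_pairwise {ps sl d g} (h : Shape ps sl d g) :
    (d.items.map Prod.fst).Pairwise (· < ·) := by
  obtain ⟨D, hit, -, hlt, hpw⟩ := h
  rw [hit]
  by_cases hsl : sl = []
  · simpa [hsl] using hpw
  · simp only [hsl, List.map_append]
    rw [List.pairwise_append]
    refine ⟨hpw, by simp, ?_⟩
    intro a ha b hb
    simp at hb
    subst hb
    exact hlt a ha

lemma shape_step (ps sl : List String) (d : PySem.Dict Int (List String)) (g : Int)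
    (line : String) (h : Shape ps sl d g) :
    Shape (aStep (ps, sl) line).1 (aStep (ps, sl) line).2 (bStep (d, g) line).1 (bStep (d, g) line).2 := by
  obtain ⟨D, hit, hps, hlt, hpw⟩ := h
  by_cases h1 : PySem.Str.strip line = ""
  · simpa [aStep, bStep, h1] using ⟨D, hit, hps, hlt, hpw⟩
  by_cases h2 : PySem.Str.isIn "sentence #" (PySem.Str.lower line) = true
  · -- marker: A flushes, B bumps gid
    have ha : aStep (ps, sl) line = (flushA (ps, sl), []) := by
      simp only [aStep, flushA]; rw [if_neg h1, if_pos h2]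
    have hb : bStep (d, g) line = (d, g + 1) := by
      simp only [bStep]; rw [if_neg h1, if_pos h2]
    rw [ha, hb]
    dsimp only
    refine ⟨d.items, by simp, ?_, ?_, shape_keys_pairwise ⟨D, hit, hps, hlt, hpw⟩⟩
    · rw [hit]
      by_cases hsl : sl = [] <;> simp [flushA, hsl, hps]
    · intro k hk
      rw [hit] at hk
      by_cases hsl : sl = []
      · simp only [hsl, if_pos, List.append_nil] at hk
        exact lt_trans (hlt k hk) (by omega)
      · simp only [hsl, List.map_append, List.mem_append] at hk
        rcases hk with hk | hk
        · exact lt_trans (hlt k hk) (by omega)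
        · simp at hk; omega
  by_cases h3 : PySem.Str.pyGet? (PySem.Str.strip line) 0 = some '('
  · -- paren line: A appends to the buffer, B appends under key gid
    have ha : aStep (ps, sl) line = (ps, sl ++ [PySem.Str.strip line]) := by
      simp only [aStep]; rw [if_neg h1, if_neg h2, if_pos h3]
    have hb : bStep (d, g) line = (d.insert g (d.getD g [] ++ [PySem.Str.strip line]), g) := by
      simp only [bStep]; rw [if_neg h1, if_neg h2, if_pos h3]
    rw [ha, hb]
    dsimp only
    have hnodup : d.keys.Nodup :=
      (shape_keys_pairwise ⟨D, hit, hps, hlt, hpw⟩).imp (fun h => ne_of_lt h)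
    by_cases hsl : sl = []
    · -- fresh key g
      have hitD : d.items = D := by simpa [hsl] using hit
      have hgnot : g ∉ d.keys := by
        intro hg
        simp only [PySem.Dict.keys, hitD] at hg
        exact absurd rfl (ne_of_lt (hlt g hg))
      have hcont : d.contains g = false := by
        rw [PySem.Dict.contains_eq_decide_mem_keys]; simp [hgnot]
      have hgetD : d.getD g [] = [] := PySem.Dict.getD_of_not_contains d [] hcont
      refine ⟨D, ?_, hps, hlt, hpw⟩
      rw [PySem.Dict.items_insert_of_not_contains d _ hcont, hitD, hgetD]
      simp [hsl]
    · -- key g is the last item, value sl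
      have hitD : d.items = D ++ [(g, sl)] := by simpa [hsl] using hit
      have hmem : (g, sl) ∈ d.items := by rw [hitD]; simp
      have hgetD : d.getD g [] = sl := PySem.Dict.getD_of_mem_items d hmem hnodup []
      have hcont : d.contains g = true := by
        rw [PySem.Dict.contains_eq_decide_mem_keys]
        have hmk : g ∈ d.keys := by simp [PySem.Dict.keys, hitD]
        simp [hmk]
      refine ⟨D, ?_, hps, hlt, hpw⟩
      rw [PySem.Dict.items_insert_of_contains d _ hcont, hitD, hgetD]
      rw [List.map_append]
      have hDsame : D.map (fun p => if p.1 == g then (g, sl ++ [PySem.Str.strip line]) else p) = D := by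
        conv_rhs => rw [← List.map_id D]
        apply List.map_congr_left
        intro p hp
        have : p.1 ≠ g := ne_of_lt (hlt p.1 (List.mem_map_of_mem hp))
        simp [this]
      rw [hDsame]
      simp [hsl]
  · have ha : aStep (ps, sl) line = (ps, sl) := by
      simp only [aStep]; rw [if_neg h1, if_neg h2, if_neg h3]
    have hb : bStep (d, g) line = (d, g) := by
      simp only [bStep]; rw [if_neg h1, if_neg h2, if_neg h3]
    rw [ha, hb]
    exact ⟨D, hit, hps, hlt, hpw⟩

lemma fold_shape : ∀ (rest : List String) (ps sl : List String)
    (d : PySem.Dict Int (List String)) (g : Int), Shape ps sl d g →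
    Shape (rest.foldl aStep (ps, sl)).1 (rest.foldl aStep (ps, sl)).2
      (rest.foldl bStep (d, g)).1 (rest.foldl bStep (d, g)).2 := by
  intro rest
  induction rest with
  | nil => intro ps sl d g h; exact h
  | cons l t ih =>
    intro ps sl d g h
    have := shape_step ps sl d g l h
    simpa [List.foldl_cons] using
      ih (aStep (ps, sl) l).1 (aStep (ps, sl) l).2 (bStep (d, g) l).1 (bStep (d, g) l).2 this

-- reading B's output off the invariant at the end of the loop
lemma shape_final (ps sl : List String) (d : PySem.Dict Int (List String)) (g : Int)
    (h : Shape ps sl d g) :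
    flushA (ps, sl) =
      (PySem.List.sorted d.keys (fun k => k) false).map
        (fun k => PySem.Str.join " " (d.getD k [])) := by
  have hpw := shape_keys_pairwise h
  obtain ⟨D, hit, hps, hlt, -⟩ := h
  have hkeys : d.keys = d.items.map Prod.fst := rfl
  have hnodup : d.keys.Nodup := by
    rw [hkeys]; exact hpw.imp (fun h => ne_of_lt h)
  have hsorted : PySem.List.sorted d.keys (fun k => k) false = d.keys :=
    PySem.List.sorted_eq_of_perm_of_pairwise_lt d.keys d.keys (fun k => k)
      (List.Perm.refl _) (by rw [hkeys]; exact hpw)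
  rw [hsorted]
  have hmap : d.keys.map (fun k => PySem.Str.join " " (d.getD k [])) =
      d.items.map (fun e => PySem.Str.join " " e.2) := by
    conv_rhs => rw [PySem.Dict.items_eq_map_keys d hnodup []]
    rw [List.map_map]
    rfl
  rw [hmap, hit]
  by_cases hsl : sl = [] <;> simp [flushA, hsl, hps]

-- ===== VERDICT (by name: the statement is the Claim_ definition above) =====
theorem get_parsed_text_spec : Claim_equal_get_parsed_text := by
  intro lines _
  unfold Spec_get_parsed_text get_parsed_text get_parsed_text_alt
  have h0 : Shape [] [] PySem.Dict.empty 0 :=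
    ⟨[], by simp; rfl, rfl, by simp, by simp⟩
  have := fold_shape lines [] [] PySem.Dict.empty 0 h0
  have hfin := shape_final _ _ _ _ this
  simpa using hfin
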